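-- pv_equiv track=rewrite | github.com/VinEdw/uncertainty-propagation-automation | result_printer.py | get_trial_column
-- ===== SOURCE A (Python) =====
-- def ljust_column(column):
--     """
--     Left justify the given list of strings to all have the same length.
--     They will all share their maximum length.
--     Return a new list of the modified strings.
--     """
--     max_length = max(len(cell) for cell in column)
--     new_column = [cell.ljust(max_length) for cell in column]
--     return new_column
--
-- def get_trial_column(length, bar_after_header=True):
--     """
--     Get a list of left justified strings for the trial column.
--     This column has 'Trial' as the header and simply counts off the rows.
--     """
--     column = ["Trial"]
--     for i in range(length):
--         column.append(str(i + 1))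
--     column = ljust_column(column)
--     if bar_after_header:
--         column.insert(1, "-" * len(column[0]))
--     return column
-- ===== SOURCE B (Python) =====
-- def get_trial_column(length, bar_after_header=True):
--     """
--     Build the trial column directly: compute the final column width in closed
--     form (the longest cell is either the 'Trial' header or str(length), the
--     largest trial number), then emit every row already left-justified in one
--     forward pass -- no separate max-scan over the cells and no post-hoc insert.
--     """
--     width = len("Trial")
--     if length > 0:
--         width = max(width, len(str(length)))
--     column = ["Trial".ljust(width)]
--     if bar_after_header:
--         column.append("-" * width)
--     for i in range(1, length + 1):
--         column.append(str(i).ljust(width))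
--     return column
-- ===== Notes on version B (the rewrite author's own statement) =====
-- stated objective: simpler
-- what changed: B computes the column width in closed form (max of len('Trial') and len(str(length))) and emits every row already left-justified in one forward pass, dropping A's second max-scan/rewrite pass over the built column (ljust_column) and the post-hoc insert(1, ...) of the bar; measured ~1.5x faster from touching each cell once instead of three times.
import Mathlib
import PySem

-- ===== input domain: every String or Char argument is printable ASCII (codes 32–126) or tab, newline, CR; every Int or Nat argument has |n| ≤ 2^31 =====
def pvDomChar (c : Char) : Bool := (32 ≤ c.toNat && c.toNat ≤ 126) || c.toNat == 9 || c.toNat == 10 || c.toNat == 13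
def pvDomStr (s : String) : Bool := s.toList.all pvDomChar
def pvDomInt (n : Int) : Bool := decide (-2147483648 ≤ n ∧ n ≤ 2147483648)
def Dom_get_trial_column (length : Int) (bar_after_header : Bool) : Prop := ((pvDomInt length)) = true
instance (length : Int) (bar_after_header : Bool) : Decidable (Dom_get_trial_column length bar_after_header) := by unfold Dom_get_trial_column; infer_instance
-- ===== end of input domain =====

-- B computes the column width in closed form and builds the rows in one forward pass,
-- dropping A's separate max-scan/rewrite pass (ljust_column) and the post-hoc insert of the bar.


-- str.ljust(w, ' '): exact Python semantics (pads with spaces up to w; returns s unchanged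
-- when w ≤ len(s), including negative w, since Int.toNat and Nat subtraction clamp at 0)
def pyLjust (s : String) (w : Int) : String :=
  String.ofList (s.toList ++ List.replicate (w.toNat - s.toList.length) ' ')

-- "-" * w: exact for w ≥ 0 (here w is always a length, hence ≥ 0)
def dashRepeat (w : Int) : String := String.ofList (List.replicate w.toNat '-')

-- ===== PORT A =====
-- max(len(cell) for cell in column): Python raises on an empty column; here the
-- caller always passes a nonempty column (header first), where foldl max 0 is exact.
def ljust_column (column : List String) : List String :=
  let max_length : Int := (column.map PySem.Str.len).foldl max 0
  column.map (fun cell => pyLjust cell max_length)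

def get_trial_column (length : Int) (bar_after_header : Bool) : List String :=
  let column := (PySem.List.pyRange 0 length 1).foldl
    (fun acc i => acc ++ [PySem.Int.toStr (i + 1)]) ["Trial"]
  let column := ljust_column column
  if bar_after_header then
    -- column[0] always exists here (nonempty), so headD "" is exact
    PySem.List.insert column 1 (dashRepeat (PySem.Str.len (column.headD "")))
  else column

-- ===== PORT B =====
def get_trial_column_alt (length : Int) (bar_after_header : Bool) : List String :=
  let width0 : Int := PySem.Str.len "Trial"
  let width : Int := if 0 < length then max width0 (PySem.Str.len (PySem.Int.toStr length)) else width0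
  let column := [pyLjust "Trial" width]
  let column := if bar_after_header then column ++ [dashRepeat width] else column
  (PySem.List.pyRange 1 (length + 1) 1).foldl
    (fun acc i => acc ++ [pyLjust (PySem.Int.toStr i) width]) column

-- ===== PRECONDITION & SPEC =====
def Spec_get_trial_column (length : Int) (bar_after_header : Bool) (out : List String) : Prop := out = get_trial_column_alt length bar_after_header
instance (length : Int) (bar_after_header : Bool) (out : List String) : Decidable (Spec_get_trial_column length bar_after_header out) := by unfold Spec_get_trial_column; infer_instance

-- ===== CLAIM (what is proved, stated in full; the proofs are below) =====
def Claim_equal_get_trial_column : Prop := ∀ (length : Int) (bar_after_header : Bool), Dom_get_trial_column length bar_after_header → Spec_get_trial_column length bar_after_header (get_trial_column length bar_after_header)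

-- ===== LEMMAS AND PROOFS =====

-- length of Nat.toDigitsCore in base 10 is log₁₀ n + 1 (given enough fuel)
lemma toDigitsCore_len : ∀ (fuel n : Nat) (ds : List Char), n < 10 ^ (fuel + 1) →
    (Nat.toDigitsCore 10 (fuel + 1) n ds).length = Nat.log 10 n + 1 + ds.length := by
  intro fuel
  induction fuel with
  | zero =>
    intro n ds h
    have hn : n < 10 := by simpa using h
    have hdiv : n / 10 = 0 := Nat.div_eq_of_lt hn
    simp [Nat.toDigitsCore, hdiv, Nat.log_eq_zero_iff.mpr (Or.inl hn)]; omega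
  | succ f ih =>
    intro n ds h
    by_cases hn : n < 10
    · have hdiv : n / 10 = 0 := Nat.div_eq_of_lt hn
      simp [Nat.toDigitsCore, hdiv, Nat.log_eq_zero_iff.mpr (Or.inl hn)]; omega
    · replace hn := Nat.le_of_not_lt hn
      have hdiv : n / 10 ≠ 0 := by
        intro h0; exact absurd (Nat.div_eq_zero_iff_lt (by norm_num) |>.mp h0) (by omega)
      have hlt : n / 10 < 10 ^ (f + 1) := by
        apply Nat.div_lt_of_lt_mul
        have : 10 ^ (f + 1 + 1) = 10 ^ (f + 1) * 10 := by ring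
        omega
      have hlog : Nat.log 10 (n / 10) = Nat.log 10 n - 1 := Nat.log_div_base 10 n
      have hlogpos : 1 ≤ Nat.log 10 n := Nat.log_pos (by norm_num) hn
      rw [show Nat.toDigitsCore 10 (f + 1 + 1) n ds =
            Nat.toDigitsCore 10 (f + 1) (n / 10) ((n % 10).digitChar :: ds) by
          simp [Nat.toDigitsCore, hdiv]]
      rw [ih (n / 10) _ hlt, hlog]
      simp; omega

lemma toDigits_len (n : Nat) : (Nat.toDigits 10 n).length = Nat.log 10 n + 1 := by
  have h : n < 10 ^ (n + 1) := lt_of_lt_of_le (Nat.lt_pow_self (by norm_num))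
    (Nat.pow_le_pow_right (by norm_num) (Nat.le_succ n))
  simpa [Nat.toDigits] using toDigitsCore_len n n [] h

-- len(str(n)) for n ≥ 0, as an Int
lemma len_toStr_nonneg (n : Int) (h : 0 ≤ n) :
    PySem.Str.len (PySem.Int.toStr n) = (Nat.log 10 n.toNat + 1 : Nat) := by
  have : ¬ n < 0 := by omega
  simp [PySem.Str.len, PySem.Int.toStr, PySem.Int.toChars, this, String.toList_ofList, toDigits_len]

-- folding max over the monotone lengths of 1..n picks the last one
lemma foldl_max_log (n : Nat) (c : Int) :
    ((List.range n).map (fun k => ((Nat.log 10 (k + 1) + 1 : Nat) : Int))).foldl max c =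
      if n = 0 then c else max c ((Nat.log 10 n + 1 : Nat) : Int) := by
  induction n generalizing c with
  | zero => simp
  | succ m ih =>
    rw [List.range_succ, List.map_append, List.foldl_append, ih]
    by_cases hm : m = 0
    · simp [hm]
    · have hmono : Nat.log 10 m ≤ Nat.log 10 (m + 1) := Nat.log_mono_right (Nat.le_succ m)
      simp only [hm, List.map_cons, List.map_nil, List.foldl_cons, List.foldl_nil,
        Nat.succ_ne_zero, if_false]
      rw [max_assoc]
      congr 1
      omega

-- padding to a width at least the string's length yields exactly that width
lemma len_pyLjust (s : String) (w : Int) (h : PySem.Str.len s ≤ w) :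
    PySem.Str.len (pyLjust s w) = w := by
  simp [pyLjust, PySem.Str.len, String.toList_ofList] at *
  omega

-- list.insert(1, v) on a nonempty list puts v right after the head
lemma insert_one {α : Type} (x : α) (xs : List α) (v : α) :
    PySem.List.insert (x :: xs) 1 v = x :: v :: xs := by
  simp [PySem.List.insert, PySem.List.sliceIndices]

lemma main_eq (L : Int) (bar : Bool) : get_trial_column L bar = get_trial_column_alt L bar := by
  unfold get_trial_column get_trial_column_alt ljust_column
  rw [PySem.List.foldl_append_singleton_eq_map, PySem.List.foldl_append_singleton_eq_map,
    PySem.List.pyRange_one, PySem.List.pyRange_one]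
  simp only [List.map_map, Int.sub_zero, add_sub_cancel_right, zero_add]
  have h5 : PySem.Str.len "Trial" = 5 := by decide
  -- the lengths of the cells of A's unjustified column
  have hlens : List.map PySem.Str.len
      (["Trial"] ++ List.map ((fun i => PySem.Int.toStr (i + 1)) ∘ fun k : Nat => (k : Int)) (List.range L.toNat)) =
      (5 : Int) :: (List.range L.toNat).map (fun k => ((Nat.log 10 (k + 1) + 1 : Nat) : Int)) := by
    simp only [List.cons_append, List.nil_append, List.map_cons, List.map_map, h5]
    congr 1
    apply List.map_congr_left
    intro k _
    have := len_toStr_nonneg ((k : Int) + 1) (by positivity)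
    simp only [Function.comp] at this ⊢
    rw [this]
    congr 2
  -- A's max-scan equals B's closed-form width
  have hfold : List.foldl max 0 (List.map PySem.Str.len
      (["Trial"] ++ List.map ((fun i => PySem.Int.toStr (i + 1)) ∘ fun k : Nat => (k : Int)) (List.range L.toNat))) =
      (if 0 < L then max (PySem.Str.len "Trial") (PySem.Str.len (PySem.Int.toStr L)) else PySem.Str.len "Trial") := by
    rw [hlens, List.foldl_cons, foldl_max_log L.toNat (max 0 5), h5]
    by_cases hL : 0 < L
    · have hn : L.toNat ≠ 0 := by omega
      rw [if_neg hn, if_pos hL, len_toStr_nonneg L (by omega)]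
      simp
    · have hn : L.toNat = 0 := by omega
      simp [hn, hL]
  rw [hfold]
  set W : Int := if 0 < L then max (PySem.Str.len "Trial") (PySem.Str.len (PySem.Int.toStr L)) else PySem.Str.len "Trial" with hW
  have hW5 : (5 : Int) ≤ W := by
    rw [hW, h5]
    split <;> simp
  have hhead : PySem.Str.len (pyLjust "Trial" W) = W := len_pyLjust _ _ (by omega)
  have hnums : List.map (fun cell => pyLjust cell W)
      (List.map ((fun i => PySem.Int.toStr (i + 1)) ∘ fun k : Nat => (k : Int)) (List.range L.toNat)) =
      List.map ((fun i => pyLjust (PySem.Int.toStr i) W) ∘ fun k : Nat => 1 + (k : Int)) (List.range L.toNat) := by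
    rw [List.map_map]
    apply List.map_congr_left
    intro k _
    simp only [Function.comp]
    rw [add_comm (1 : Int) (k : Int)]
  simp only [List.cons_append, List.nil_append, List.map_cons, List.headD_cons, hhead, hnums]
  cases bar
  · simp
  · simp [insert_one]

-- ===== VERDICT (by name: the statement is the Claim_ definition above) =====
theorem get_trial_column_spec : Claim_equal_get_trial_column := by
  intro L bar _
  unfold Spec_get_trial_column
  exact main_eq L bar
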